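-- pv_equiv track=rewrite | github.com/whittin3/ministack | ministack/services/kinesis.py | _compute_hash_ranges
-- ===== SOURCE A (Python) =====
-- MAX_HASH_KEY = (2**128) - 1
--
-- def _compute_hash_ranges(shard_count):
--     range_size = (MAX_HASH_KEY + 1) // shard_count
--     ranges = []
--     for i in range(shard_count):
--         start = i * range_size
--         end = ((i + 1) * range_size - 1) if i < shard_count - 1 else MAX_HASH_KEY
--         ranges.append((str(start), str(end)))
--     return ranges
-- ===== SOURCE B (Python) =====
-- MAX_HASH_KEY = (2**128) - 1
--
-- def _compute_hash_ranges(shard_count):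
--     range_size = (MAX_HASH_KEY + 1) // shard_count
--     ranges = []
--     end = MAX_HASH_KEY
--     i = shard_count - 1
--     while i >= 0:
--         start = i * range_size
--         ranges.append((str(start), str(end)))
--         end = start - 1
--         i -= 1
--     ranges.reverse()
--     return ranges
-- ===== Notes on version B (the rewrite author's own statement) =====
-- stated objective: alternative
-- what changed: A fills the list front-to-back with a per-iteration conditional for the last shard's end; B builds the list BACK-TO-FRONT with a countdown while loop that carries the running end boundary in an accumulator (end = previous start - 1), so no last-element special case exists.
-- outside the precondition, e.g. on _compute_hash_ranges(0): A raises ZeroDivisionError, B raises ZeroDivisionError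
import Mathlib
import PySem

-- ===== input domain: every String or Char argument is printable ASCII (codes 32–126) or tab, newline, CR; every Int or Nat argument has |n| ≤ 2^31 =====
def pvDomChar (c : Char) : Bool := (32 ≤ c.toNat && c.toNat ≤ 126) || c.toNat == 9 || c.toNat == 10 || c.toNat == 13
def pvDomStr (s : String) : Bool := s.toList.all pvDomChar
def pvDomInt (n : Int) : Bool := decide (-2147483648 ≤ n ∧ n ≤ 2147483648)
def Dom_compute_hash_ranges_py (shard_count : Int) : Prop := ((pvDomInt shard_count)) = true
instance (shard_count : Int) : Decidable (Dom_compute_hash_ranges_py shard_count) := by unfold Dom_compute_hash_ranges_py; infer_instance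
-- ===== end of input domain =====

-- B builds the range list BACK-TO-FRONT with a countdown loop carrying the running end
-- boundary (end = previous start - 1), removing A's last-shard special case (objective: alternative).


def MAX_HASH_KEY : Int := 2 ^ 128 - 1

-- ===== PORT A =====
def compute_hash_ranges_py (shard_count : Int) : List (String × String) :=
  let range_size := PySem.Int.floordiv (MAX_HASH_KEY + 1) shard_count
  (PySem.List.pyRange 0 shard_count).foldl (fun ranges i =>
    let start := i * range_size
    let e := if i < shard_count - 1 then (i + 1) * range_size - 1 else MAX_HASH_KEY
    ranges ++ [(PySem.Int.toStr start, PySem.Int.toStr e)]) []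

-- ===== PORT B =====
-- B's while loop 'while i >= 0' counts i down from shard_count - 1; it is transcribed as a
-- recursion on fuel = i + 1 (the number of remaining iterations), with the loop state
-- (end, ranges) carried as arguments; the final ranges.reverse() is List.reverse.
def chrAltLoop (range_size : Int) : Nat → Int → List (String × String) → List (String × String)
  | 0, _, ranges => ranges
  | k + 1, endv, ranges =>
    let i : Int := (k : Int)
    let start := i * range_size
    chrAltLoop range_size k (start - 1) (ranges ++ [(PySem.Int.toStr start, PySem.Int.toStr endv)])

def compute_hash_ranges_py_alt (shard_count : Int) : List (String × String) :=
  let range_size := PySem.Int.floordiv (MAX_HASH_KEY + 1) shard_count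
  (chrAltLoop range_size shard_count.toNat MAX_HASH_KEY []).reverse

-- ===== PRECONDITION & SPEC =====
-- Pre_ excludes exactly shard_count = 0, where Python's '//' raises ZeroDivisionError (in A and in B).
def Pre_compute_hash_ranges_py (shard_count : Int) : Prop := shard_count ≠ 0
instance (shard_count : Int) : Decidable (Pre_compute_hash_ranges_py shard_count) := by unfold Pre_compute_hash_ranges_py; infer_instance
def pvWitness_compute_hash_ranges_py : Int := 4
def Spec_compute_hash_ranges_py (shard_count : Int) (out : List (String × String)) : Prop := out = compute_hash_ranges_py_alt shard_count
instance (shard_count : Int) (out : List (String × String)) : Decidable (Spec_compute_hash_ranges_py shard_count out) := by unfold Spec_compute_hash_ranges_py; infer_instance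

-- ===== CLAIM =====
def Claim_equal_compute_hash_ranges_py : Prop := ∀ (shard_count : Int), Dom_compute_hash_ranges_py shard_count → Pre_compute_hash_ranges_py shard_count → Spec_compute_hash_ranges_py shard_count (compute_hash_ranges_py shard_count)

-- ===== LEMMAS AND PROOFS =====

-- Closed form of B's countdown loop: after the accumulator, the pairs for i = k-1 down to 0;
-- the end of pair i is (i+1)*rs - 1 except pair k-1, whose end is the carried endv.
lemma chrAltLoop_eq (rs : Int) (k : Nat) (endv : Int) (acc : List (String × String)) :
    chrAltLoop rs k endv acc =
      acc ++ ((List.range k).map (fun (i : Nat) =>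
        (PySem.Int.toStr ((i : Int) * rs),
         PySem.Int.toStr (if i + 1 = k then endv else ((i : Int) + 1) * rs - 1)))).reverse := by
  induction k generalizing endv acc with
  | zero => simp [chrAltLoop]
  | succ k ih =>
    rw [chrAltLoop, ih, List.range_succ]
    have hmap : List.map (fun (i : Nat) =>
          (PySem.Int.toStr ((i : Int) * rs),
           PySem.Int.toStr (if i + 1 = k then (k : Int) * rs - 1 else ((i : Int) + 1) * rs - 1)))
          (List.range k)
        = List.map (fun (i : Nat) =>
          (PySem.Int.toStr ((i : Int) * rs),
           PySem.Int.toStr (if i + 1 = k + 1 then endv else ((i : Int) + 1) * rs - 1)))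
          (List.range k) := by
      apply List.map_congr_left
      intro a ha
      rw [List.mem_range] at ha
      rw [if_neg (show ¬ a + 1 = k + 1 by omega)]
      by_cases h2 : a + 1 = k
      · rw [if_pos h2, show ((a : Int) + 1) = (k : Int) by omega]
      · rw [if_neg h2]
    rw [hmap]
    simp [List.reverse_append]

-- ===== VERDICT =====
theorem compute_hash_ranges_py_spec : Claim_equal_compute_hash_ranges_py := by
  intro n _ hpre
  unfold Spec_compute_hash_ranges_py compute_hash_ranges_py compute_hash_ranges_py_alt
  dsimp only
  rw [chrAltLoop_eq]
  simp only [PySem.List.foldl_append_singleton_eq_map, List.nil_append, List.append_nil,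
    List.reverse_reverse, PySem.List.pyRange_one]
  rw [List.map_map, show n - 0 = n from by ring]
  apply List.map_congr_left
  intro i hi
  rw [List.mem_range] at hi
  have hin : (i : Int) < n := by omega
  simp only [Function.comp_apply, zero_add]
  by_cases hlast : i + 1 = n.toNat
  · rw [if_neg (show ¬ (i : Int) < n - 1 by omega), if_pos hlast]
  · rw [if_pos (show (i : Int) < n - 1 by omega), if_neg hlast]
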